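-- pv_equiv track=rewrite | github.com/globalarray/inf-ege | 01_05_2025/number25_1.py | to31
-- ===== SOURCE A (Python) =====
-- alphabet = "ABCDEFGHIJKLMNOPQRSTUVWXYZ"
--
-- def to31(n):
--     r = ""
--
--     while n > 0:
--         v = n % 31
--
--         if v > 9:
--             r += alphabet[v - 10]
--         else:
--             r += str(v)
--
--         n //= 31
--     return r[::-1]
-- ===== SOURCE B (Python) =====
-- digits31 = "0123456789ABCDEFGHIJKLMNOPQRSTU"
--
-- def to31(n):
--     return "" if n <= 0 else to31(n // 31) + digits31[n % 31]
-- ===== Notes on version B (the rewrite author's own statement) =====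
-- stated objective: simpler
-- what changed: Replaced the accumulate-least-significant-first-then-reverse while loop and the two-way digit branch (str(v) vs alphabet lookup) with a one-line recursion on the quotient that indexes a single precomputed digit table, so there is no accumulator, no branch and no final reversal.
import Mathlib
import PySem

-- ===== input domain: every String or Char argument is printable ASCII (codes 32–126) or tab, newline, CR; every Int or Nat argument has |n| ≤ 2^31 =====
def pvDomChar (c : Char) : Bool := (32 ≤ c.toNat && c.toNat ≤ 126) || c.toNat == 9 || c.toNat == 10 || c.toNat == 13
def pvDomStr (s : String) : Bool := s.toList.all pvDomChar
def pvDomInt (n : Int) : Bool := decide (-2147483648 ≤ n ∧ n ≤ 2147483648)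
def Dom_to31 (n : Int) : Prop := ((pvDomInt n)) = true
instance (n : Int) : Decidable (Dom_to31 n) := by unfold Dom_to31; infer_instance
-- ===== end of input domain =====

-- B replaces A's accumulate-then-reverse loop and its digit branch with a one-line
-- recursion on n // 31 indexing a precomputed 31-character digit table (simpler, same cost).

-- ===== PORT A =====
-- A's digit: 'alphabet[v-10] if v > 9 else str(v)'.  The 'none' branch of pyGet?
-- (IndexError) is unreachable here since v = n % 31 lies in 0..30.
def pyDigitA (v : Int) : List Char :=
  if v > 9 then
    match PySem.Str.pyGet? "ABCDEFGHIJKLMNOPQRSTUVWXYZ" (v - 10) with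
    | some c => [c]
    | none => []
  else PySem.Int.toChars v

-- the while loop: state is (n, r); r[::-1] at the end is List.reverse
def to31Loop (n : Int) (r : List Char) : List Char :=
  if _h : n > 0 then
    to31Loop (PySem.Int.floordiv n 31) (r ++ pyDigitA (PySem.Int.mod n 31))
  else r
termination_by n.toNat
decreasing_by
  rw [PySem.Int.floordiv_eq_ediv_of_pos (by omega)]
  omega

def to31 (n : Int) : String := String.ofList (to31Loop n []).reverse

-- ===== PORT B =====
def digits31 : String := "0123456789ABCDEFGHIJKLMNOPQRSTU"

def to31Rec (n : Int) : List Char :=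
  if n ≤ 0 then []
  else
    to31Rec (PySem.Int.floordiv n 31) ++
      (match PySem.Str.pyGet? digits31 (PySem.Int.mod n 31) with
       | some c => [c]
       | none => [])
termination_by n.toNat
decreasing_by
  rw [PySem.Int.floordiv_eq_ediv_of_pos (by omega)]
  omega

def to31_alt (n : Int) : String := String.ofList (to31Rec n)

-- ===== PRECONDITION & SPEC =====
def Spec_to31 (n : Int) (out : String) : Prop := out = to31_alt n
instance (n : Int) (out : String) : Decidable (Spec_to31 n out) := by unfold Spec_to31; infer_instance

-- ===== CLAIM (what is proved, stated in full; the proofs are below) =====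
def Claim_equal_to31 : Prop := ∀ (n : Int), Dom_to31 n → Spec_to31 n (to31 n)

-- ===== LEMMAS AND PROOFS =====

-- A's branching digit and B's table digit agree on 0..30, and both are singletons
theorem digit_eq (v : Int) (h0 : 0 ≤ v) (h1 : v < 31) :
    (match PySem.Str.pyGet? digits31 v with
     | some c => [c]
     | none => []) = pyDigitA v := by
  interval_cases v <;> decide

-- a single digit string is its own reverse (B's table digit has exactly 1 character)
theorem digit_rev (v : Int) (h0 : 0 ≤ v) (h1 : v < 31) :
    (pyDigitA v).reverse = pyDigitA v := by
  interval_cases v <;> decide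

-- loop invariant: A's loop extends r by B's digits in reverse order
theorem to31Loop_eq (n : Int) (r : List Char) :
    to31Loop n r = r ++ (to31Rec n).reverse := by
  fun_induction to31Loop n r with
  | case1 n r h ih =>
    rw [ih]
    conv_rhs => rw [to31Rec, if_neg (by omega)]
    have hm0 : 0 ≤ PySem.Int.mod n 31 := by
      rw [PySem.Int.mod_eq_emod_of_pos (by omega)]
      exact Int.emod_nonneg n (by omega)
    have hm1 : PySem.Int.mod n 31 < 31 := by
      rw [PySem.Int.mod_eq_emod_of_pos (by omega)]
      exact Int.emod_lt_of_pos n (by omega)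
    rw [List.reverse_append, digit_eq _ hm0 hm1, digit_rev _ hm0 hm1, List.append_assoc]
  | case2 n r h =>
    rw [to31Rec]
    simp [not_lt.mp (by simpa using h)]

-- ===== VERDICT (by name: the statement is the Claim_ definition above) =====
theorem to31_spec : Claim_equal_to31 := by
  intro n _
  unfold Spec_to31 to31 to31_alt
  rw [to31Loop_eq]
  simp
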